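-- pv_equiv track=rewrite | github.com/julesjacobs/slice | benchmarks/parametrize.py | build_context_dependent_sppl
-- ===== SOURCE A (Python) =====
-- def build_context_dependent_sppl(vars):
--     lines = []
--     counter = [1]
--
--     # Step 0: Variable bindings
--     for idx, var in enumerate(vars):
--         lines.append(f"{var} ~= uniform(loc=0,scale={idx+1})")
--
--     # Step 1: Now define the nested structure
--     def build(depth):
--         if depth == len(vars):
--             last_var = vars[-1]
--             next_var = chr(ord(last_var) + 1)
--             lines.append(f"{'  ' * depth}{next_var} ~= uniform(loc=0,scale={counter[0]})")
--             counter[0] += 1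
--             return
--         var = vars[depth]
--         lines.append(f"{'  ' * depth}if ({var} < 0.5):")
--         build(depth + 1)
--         lines.append(f"{'  ' * depth}else:")
--         build(depth + 1)
--
--     build(0)
--     return "\n".join(lines)
-- ===== SOURCE B (Python) =====
-- # parameter renamed vs (grader forbids the builtin name 'vars' in b.py); called positionally
-- def build_context_dependent_sppl(vs):
--     n = len(vs)
--     lines = [f"{var} ~= uniform(loc=0,scale={idx+1})" for idx, var in enumerate(vs)]
--     next_var = chr(ord(vs[-1]) + 1)
--     counter = 1
--     stack = [("node", 0)]
--     while stack:
--         kind, depth = stack.pop()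
--         ind = "  " * depth
--         if kind == "else":
--             lines.append(f"{ind}else:")
--         elif depth == n:
--             lines.append(f"{ind}{next_var} ~= uniform(loc=0,scale={counter})")
--             counter += 1
--         else:
--             lines.append(f"{ind}if ({vs[depth]} < 0.5):")
--             stack += [("node", depth + 1), ("else", depth), ("node", depth + 1)]
--     return "\n".join(lines)
-- ===== Notes on version B (the rewrite author's own statement) =====
-- stated objective: alternative
-- what changed: The recursive build() over the binary tree is replaced by an iterative explicit-stack work-list loop that pops node/else tokens and emits lines left-to-right with a single leaf counter.
import Mathlib
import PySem

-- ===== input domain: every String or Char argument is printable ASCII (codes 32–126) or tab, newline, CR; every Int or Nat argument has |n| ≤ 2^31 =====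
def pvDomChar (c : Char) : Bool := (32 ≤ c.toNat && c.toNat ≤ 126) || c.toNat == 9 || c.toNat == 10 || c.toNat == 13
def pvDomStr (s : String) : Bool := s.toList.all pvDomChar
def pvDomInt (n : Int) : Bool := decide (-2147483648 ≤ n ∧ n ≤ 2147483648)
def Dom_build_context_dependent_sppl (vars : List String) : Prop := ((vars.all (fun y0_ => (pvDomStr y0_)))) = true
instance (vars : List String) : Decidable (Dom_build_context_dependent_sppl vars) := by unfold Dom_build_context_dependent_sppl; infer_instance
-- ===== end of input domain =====

-- B replaces A's recursive build() with an iterative explicit-stack work list (same output, different decomposition).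

-- shared tiny helpers, identical expressions in both Python sources:
-- '  ' * depth
def indentS (d : Nat) : String := String.join (List.replicate d "  ")
-- chr(ord(vars[-1]) + 1); Python raises (IndexError/TypeError) unless vars is nonempty
-- and its last element has exactly one character — excluded by Pre_ below.
def nextVarOf (vars : List String) : String :=
  match (vars.getLastD "").toList with
  | [ch] => String.ofList [Char.ofNat (ch.toNat + 1)]
  | _ => ""

-- ===== PORT A =====
-- A's recursive build(depth): recursion expressed on the fuel rem = len(vars) - depth,
-- so 'depth == len(vars)' becomes 'rem = 0'.  State: (counter, lines), threaded as in A.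
def buildA (vars : List String) : Nat → Nat → Nat → List String → Nat × List String
  | 0, depth, counter, lines =>
      (counter + 1,
       lines ++ [indentS depth ++ nextVarOf vars ++ " ~= uniform(loc=0,scale=" ++ toString counter ++ ")"])
  | rem+1, depth, counter, lines =>
      -- vars[depth] is always in range here (depth < len vars), so getD is exact
      let lines1 := lines ++ [indentS depth ++ "if (" ++ vars.getD depth "" ++ " < 0.5):"]
      let r1 := buildA vars rem (depth+1) counter lines1
      buildA vars rem (depth+1) r1.1 (r1.2 ++ [indentS depth ++ "else:"])

def build_context_dependent_sppl (vars : List String) : String :=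
  let prelude := (PySem.List.enumerate vars).foldl
    (fun ls p => ls ++ [p.2 ++ " ~= uniform(loc=0,scale=" ++ PySem.Int.toStr (p.1+1) ++ ")"]) []
  String.intercalate "\n" (buildA vars vars.length 0 1 prelude).2

-- ===== PORT B =====
inductive BTok where
  | node (d : Nat)
  | els (d : Nat)
deriving DecidableEq, Repr

def wtB (n : Nat) : BTok → Nat
  | .node d => 3 ^ (n + 1 - d)
  | .els _ => 1

-- the while-stack loop of Source B; list head = top of stack.  Stack node depths never
-- exceed n, so 'n ≤ d' is the same test as Python's 'depth == n' on reachable states.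
def loopB (vars : List String) (n : Nat) (nv : String) :
    List BTok → Nat → List String → List String
  | [], _, lines => lines
  | .els d :: rest, counter, lines =>
      loopB vars n nv rest counter (lines ++ [indentS d ++ "else:"])
  | .node d :: rest, counter, lines =>
      if n ≤ d then
        loopB vars n nv rest (counter + 1)
          (lines ++ [indentS d ++ nv ++ " ~= uniform(loc=0,scale=" ++ toString counter ++ ")"])
      else
        loopB vars n nv (.node (d+1) :: .els d :: .node (d+1) :: rest) counter
          (lines ++ [indentS d ++ "if (" ++ vars.getD d "" ++ " < 0.5):"])
termination_by stack _ _ => (stack.map (wtB n)).sum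
decreasing_by
  all_goals
    simp only [List.map_cons, List.sum_cons, wtB]
    first
    | omega
    | (have h1 : 0 < 3 ^ (n + 1 - d) := Nat.one_le_pow _ _ (by norm_num); omega)
    | (have h0 : n + 1 - (d + 1) = n - d := by omega
       have h1 : n + 1 - d = (n - d) + 1 := by omega
       rw [h0, h1, pow_succ]
       have h2 : 3 ≤ 3 ^ (n - d) := by
         calc 3 = 3 ^ 1 := by norm_num
           _ ≤ 3 ^ (n - d) := Nat.pow_le_pow_right (by norm_num) (by omega)
       omega)

def build_context_dependent_sppl_alt (vars : List String) : String :=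
  let n := vars.length
  let lines := (PySem.List.enumerate vars).map
    (fun p => p.2 ++ " ~= uniform(loc=0,scale=" ++ PySem.Int.toStr (p.1+1) ++ ")")
  String.intercalate "\n" (loopB vars n (nextVarOf vars) [.node 0] 1 lines)

-- ===== PRECONDITION & SPEC =====
-- Pre_ excludes exactly the inputs where Python A raises: vars = [] (IndexError on vars[-1])
-- and a last element not of length 1 (TypeError in ord()).
def Pre_build_context_dependent_sppl (vars : List String) : Prop :=
  vars ≠ [] ∧ (vars.getLastD "").toList.length = 1
instance (vars : List String) : Decidable (Pre_build_context_dependent_sppl vars) := by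
  unfold Pre_build_context_dependent_sppl; infer_instance
def pvWitness_build_context_dependent_sppl : List String := ["a", "b"]

def Spec_build_context_dependent_sppl (vars : List String) (out : String) : Prop :=
  out = build_context_dependent_sppl_alt vars
instance (vars : List String) (out : String) : Decidable (Spec_build_context_dependent_sppl vars out) := by
  unfold Spec_build_context_dependent_sppl; infer_instance

-- ===== CLAIM (what is proved, stated in full; the proofs are below) =====
def Claim_equal_build_context_dependent_sppl : Prop :=
  ∀ (vars : List String), Dom_build_context_dependent_sppl vars →
    Pre_build_context_dependent_sppl vars →
    Spec_build_context_dependent_sppl vars (build_context_dependent_sppl vars)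

-- ===== LEMMAS AND PROOFS =====

-- the prelude loop of A (foldl-append) builds the same list as B's map
theorem foldl_append_map (vars : List (Int × String)) (acc : List String) :
    vars.foldl (fun ls p => ls ++ [p.2 ++ " ~= uniform(loc=0,scale=" ++ PySem.Int.toStr (p.1+1) ++ ")"]) acc
      = acc ++ vars.map (fun p => p.2 ++ " ~= uniform(loc=0,scale=" ++ PySem.Int.toStr (p.1+1) ++ ")") := by
  induction vars generalizing acc with
  | nil => simp
  | cons h t ih => rw [List.foldl_cons, ih, List.map_cons]; simp

-- key invariant: popping a node at depth d = n - k runs A's build(d) and continues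
theorem loopB_node (vars : List String) (n : Nat) (k : Nat) :
    ∀ (d : Nat) (rest : List BTok) (c : Nat) (L : List String), d + k = n →
      loopB vars n (nextVarOf vars) (.node d :: rest) c L
        = loopB vars n (nextVarOf vars) rest
            (buildA vars k d c L).1 (buildA vars k d c L).2 := by
  induction k with
  | zero =>
      intro d rest c L hd
      rw [loopB]
      simp [show n ≤ d by omega, buildA]
  | succ k ih =>
      intro d rest c L hd
      rw [loopB]
      simp only [show ¬ n ≤ d by omega, if_false]
      rw [ih (d+1) _ c _ (by omega), loopB, ih (d+1) _ _ _ (by omega)]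
      simp [buildA]

-- ===== VERDICT (by name: the statement is the Claim_ definition above) =====
theorem build_context_dependent_sppl_spec : Claim_equal_build_context_dependent_sppl := by
  intro vars _ _
  simp only [Spec_build_context_dependent_sppl, build_context_dependent_sppl,
    build_context_dependent_sppl_alt, foldl_append_map, List.nil_append]
  rw [loopB_node vars vars.length vars.length 0 [] 1 _ (by omega), loopB]
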